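-- pv_equiv track=rewrite | github.com/dorahee-ee/coding_test | programmers/Lv1_공원_산책.py | solution
-- ===== SOURCE A (Python) =====
-- def solution(park, routes):
--     def in_range(x, y):
--         return 0 <= x and x < len(park) and 0 <= y and y < len(park[0])
--
--     # 시작 위치 찾기
--     flag = True
--     for i in range(len(park)):
--         for j in range(len(park[i])):
--             if park[i][j] == 'S':
--                 x, y = i, j
--                 flag = False
--                 break
--         if flag == False:
--             break
--
--     dx, dy = [0, 0, 1, -1], [1, -1, 0, 0]
--     mapper = {'E':0, 'W':1, 'S':2, 'N':3}
--
--     for route in routes: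
--         direction, dist = route.split()
--         dist = int(dist)
--         move_dir = mapper[direction]
--         curr_x, curr_y = x, y
--         for _ in range(dist):
--             nx, ny = curr_x + dx[move_dir], curr_y + dy[move_dir]
--             if in_range(nx, ny) and park[nx][ny] != 'X':
--                 curr_x, curr_y = nx, ny
--             else:
--                 curr_x, curr_y = x, y
--                 break
--         x, y = curr_x, curr_y
--
--     return [x, y]
-- ===== SOURCE B (Python) =====
-- def solution(park, routes):
--     # The walk lives in the rows x len(park[0]) rectangle; crop to it, then
--     # precompute, for each cell and direction, how many consecutive passable
--     # cells lie ahead, so each route commits in O(1) by comparing its distance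
--     # with the free run at the current cell.
--     cols = len(park[0])
--     grid = [list(row[:cols]) for row in park]
--
--     def runs_before(line):
--         # out[j] = number of consecutive non-'X' cells immediately before index j
--         out, r = [], 0
--         for c in line:
--             out.append(r)
--             r = 0 if c == 'X' else r + 1
--         return out
--
--     def runs_after(line):
--         return runs_before(line[::-1])[::-1]
--
--     tgrid = [list(col) for col in zip(*grid)]
--     east = [runs_after(r) for r in grid]
--     west = [runs_before(r) for r in grid]
--     south = [runs_after(c) for c in tgrid]   # indexed [y][x]
--     north = [runs_before(c) for c in tgrid]  # indexed [y][x]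
--     x, y = next((i, row.index('S')) for i, row in enumerate(grid) if 'S' in row)
--     for route in routes:
--         d, n = route.split()
--         n = int(n)
--         if d == 'E' and n <= east[x][y]:
--             y += n
--         elif d == 'W' and n <= west[x][y]:
--             y -= n
--         elif d == 'S' and n <= south[y][x]:
--             x += n
--         elif d == 'N' and n <= north[y][x]:
--             x -= n
--     return [x, y]
-- ===== Notes on version B (the rewrite author's own statement) =====
-- stated objective: alternative
-- what changed: B crops the park to its rows x len(park[0]) rectangle and precomputes four run-length DP tables (consecutive passable cells ahead of every cell, per direction, via a prefix scan and a transpose) so each route is decided and committed in O(1) by one table lookup, replacing A's per-step cursor walk with rollback; Pre_ keeps the task's natural domain: it excludes negative distances (outside the task's forward moves; …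
-- outside the precondition, e.g. on solution(['SO'], ['E -1']): A returns [0, 0], B returns [0, -1]; on solution(['OOOS', 'OO', ''], ['N 0']): A returns [0, 3], B raises IndexError; on solution(['', 'S'], []): A returns [1, 0], B raises StopIteration
import Mathlib
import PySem

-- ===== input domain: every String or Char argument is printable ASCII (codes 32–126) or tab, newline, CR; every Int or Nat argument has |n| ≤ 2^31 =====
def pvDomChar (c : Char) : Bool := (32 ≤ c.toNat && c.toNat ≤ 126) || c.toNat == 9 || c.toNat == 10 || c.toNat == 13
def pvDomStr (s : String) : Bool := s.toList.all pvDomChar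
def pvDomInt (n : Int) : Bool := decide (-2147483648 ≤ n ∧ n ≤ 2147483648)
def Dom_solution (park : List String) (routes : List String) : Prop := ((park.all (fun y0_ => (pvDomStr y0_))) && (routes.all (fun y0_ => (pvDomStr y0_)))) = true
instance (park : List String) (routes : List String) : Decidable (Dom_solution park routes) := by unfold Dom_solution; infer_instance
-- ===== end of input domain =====

-- B precomputes four run-length tables (consecutive passable cells ahead of every
-- cell, one table per direction) so each route commits in O(1) by comparing its
-- distance with the free run at the current cell, instead of A's per-step cursor
-- walk with rollback; objective: alternative algorithm (DP tables vs simulation).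

-- ===== PORT A =====
-- park[i][j] via pyGetD with defaults (under Pre_ it is only read in range)
def pvCellA (grid : List (List Char)) (x y : Int) : Char :=
  PySem.List.pyGetD (PySem.List.pyGetD grid x []) y ' '

-- A's in_range(x, y)
def pvInRangeA (grid : List (List Char)) (x y : Int) : Bool :=
  decide (0 ≤ x) && decide (x < PySem.List.len grid) && decide (0 ≤ y) &&
    decide (y < PySem.List.len (PySem.List.pyGetD grid 0 []))

-- A's inner scan of one row looking for 'S'
def pvFindRowA : List Char → Int → Option Int
  | [], _ => none
  | c :: rest, j => if c = 'S' then some j else pvFindRowA rest (j + 1)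

-- A's nested start-finding loops with the flag/break (first row containing 'S')
def pvFindA : List (List Char) → Int → Option (Int × Int)
  | [], _ => none
  | r :: rest, i =>
    match pvFindRowA r 0 with
    | some j => some (i, j)
    | none => pvFindA rest (i + 1)

-- A's `for _ in range(dist)` cursor loop: step, or reset to (x, y) and break
def pvStepA (grid : List (List Char)) (x y dx dy : Int) : Int → Int → Nat → Int × Int
  | cx, cy, 0 => (cx, cy)
  | cx, cy, Nat.succ m =>
    if pvInRangeA grid (cx + dx) (cy + dy) && (pvCellA grid (cx + dx) (cy + dy) != 'X') then
      pvStepA grid x y dx dy (cx + dx) (cy + dy) m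
    else (x, y)

def solution (park : List String) (routes : List String) : List Int :=
  let grid := park.map String.toList
  let start := (pvFindA grid 0).getD (0, 0)
  let mapper : PySem.Dict String Int :=
    PySem.Dict.ofList [("E", 0), ("W", 1), ("S", 2), ("N", 3)]
  let fin := routes.foldl (fun (st : Int × Int) route =>
    let parts := PySem.Str.split₀ route
    let dist := (PySem.Int.ofStr? (PySem.List.pyGetD parts 1 "")).getD 0
    let md := (mapper.get? (PySem.List.pyGetD parts 0 "")).getD 0
    let dx := PySem.List.pyGetD ([0, 0, 1, -1] : List Int) md 0
    let dy := PySem.List.pyGetD ([1, -1, 0, 0] : List Int) md 0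
    pvStepA grid st.1 st.2 dx dy st.1 st.2 dist.toNat) start
  [fin.1, fin.2]

-- ===== PORT B =====
-- B's runs_before loop: accumulator r, emit the run length before each cell
def pvRunsBeforeGo : Int → List Char → List Int
  | _, [] => []
  | r, c :: cs => r :: pvRunsBeforeGo (if c = 'X' then 0 else r + 1) cs

def pvRunsBefore (line : List Char) : List Int := pvRunsBeforeGo 0 line

-- B's runs_after(line) = runs_before(line[::-1])[::-1]
def pvRunsAfter (line : List Char) : List Int := (pvRunsBefore line.reverse).reverse

-- B's zip(*grid): columns up to the shortest row
def pvTranspose (g : List (List Char)) : List (List Char) :=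
  match (g.map List.length).min? with
  | none => []
  | some m => (List.range m).map (fun j => g.map (fun r => r.getD j ' '))

-- B's next((i, row.index('S')) for i, row in enumerate(grid) if 'S' in row)
def pvStartB (grid : List (List Char)) : Option (Int × Int) :=
  (PySem.List.enumerate grid 0).findSome? (fun p =>
    if 'S' ∈ p.2 then (PySem.List.index? p.2 'S').map (fun j => (p.1, (j : Int))) else none)

def solution_alt (park : List String) (routes : List String) : List Int :=
  let cols := PySem.Str.len (PySem.List.pyGetD park 0 "")
  let grid := park.map (fun s => PySem.List.slice s.toList none (some cols))
  let tgrid := pvTranspose grid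
  let east := grid.map pvRunsAfter
  let west := grid.map pvRunsBefore
  let south := tgrid.map pvRunsAfter   -- indexed [y][x]
  let north := tgrid.map pvRunsBefore  -- indexed [y][x]
  let start := (pvStartB grid).getD (0, 0)
  let fin := routes.foldl (fun (st : Int × Int) route =>
    let parts := PySem.Str.split₀ route
    let d := PySem.List.pyGetD parts 0 ""
    let n := (PySem.Int.ofStr? (PySem.List.pyGetD parts 1 "")).getD 0
    if d = "E" ∧ n ≤ PySem.List.pyGetD (PySem.List.pyGetD east st.1 []) st.2 0 then
      (st.1, st.2 + n)
    else if d = "W" ∧ n ≤ PySem.List.pyGetD (PySem.List.pyGetD west st.1 []) st.2 0 then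
      (st.1, st.2 - n)
    else if d = "S" ∧ n ≤ PySem.List.pyGetD (PySem.List.pyGetD south st.2 []) st.1 0 then
      (st.1 + n, st.2)
    else if d = "N" ∧ n ≤ PySem.List.pyGetD (PySem.List.pyGetD north st.2 []) st.1 0 then
      (st.1 - n, st.2)
    else st) start
  [fin.1, fin.2]

-- ===== PRECONDITION & SPEC =====
-- Pre_ restricts to the task's natural domain, on which Python A returns normally:
-- the first 'S' (row-major) lies inside the rows x len(park[0]) rectangle the walk
-- is confined to; all rows reach len(park[0]) whenever there are routes; routes
-- split into a direction in {E,W,S,N} and a NON-NEGATIVE int distance.  Excluded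
-- while A still returns: negative distances (outside the task's domain of forward
-- moves; A stays put, B walks backwards), a first 'S' beyond column len(park[0])
-- (such a start can never move; B's cropped grid has no start there), and rows
-- shorter than the first combined with routes (B's tables do not model the cells A
-- would read there); on the other excluded inputs A raises
-- (NameError/ValueError/KeyError/IndexError).
def Pre_solution (park : List String) (routes : List String) : Prop :=
  park ≠ [] ∧
  ((park.find? (fun s => decide ('S' ∈ s.toList))).any (fun s =>
      (PySem.List.index? s.toList 'S').any
        (fun k => decide (k < (park.headD "").toList.length)))) = true ∧
  (routes = [] ∨ ∀ r ∈ park, (park.headD "").toList.length ≤ r.toList.length) ∧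
  ∀ route ∈ routes,
    (PySem.Str.split₀ route).length = 2 ∧
    PySem.List.pyGetD (PySem.Str.split₀ route) 0 "" ∈ (["E", "W", "S", "N"] : List String) ∧
    (PySem.Int.ofStr? (PySem.List.pyGetD (PySem.Str.split₀ route) 1 "")).isSome = true ∧
    0 ≤ (PySem.Int.ofStr? (PySem.List.pyGetD (PySem.Str.split₀ route) 1 "")).getD 0

instance (park : List String) (routes : List String) : Decidable (Pre_solution park routes) := by
  unfold Pre_solution; infer_instance

def pvWitness_solution : List String × List String := (["SO", "OX"], ["E 1", "S 1"])

def Spec_solution (park : List String) (routes : List String) (out : List Int) : Prop := out = solution_alt park routes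
instance (park : List String) (routes : List String) (out : List Int) : Decidable (Spec_solution park routes out) := by unfold Spec_solution; infer_instance

-- ===== CLAIM (what is proved, stated in full; the proofs are below) =====
def Claim_equal_solution : Prop := ∀ (park : List String) (routes : List String), Dom_solution park routes → Pre_solution park routes → Spec_solution park routes (solution park routes)

-- ===== LEMMAS AND PROOFS =====

-- A's validity test for one cell
def pvOk (grid : List (List Char)) (x y : Int) : Bool :=
  pvInRangeA grid x y && (pvCellA grid x y != 'X')

-- all of the cells 1..m steps from (cx, cy) along (dx, dy) are valid
def pvChain (grid : List (List Char)) (dx dy : Int) : Int → Int → Nat → Bool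
  | _, _, 0 => true
  | cx, cy, Nat.succ m => pvOk grid (cx + dx) (cy + dy) && pvChain grid dx dy (cx + dx) (cy + dy) m

lemma pvStepA_eq_chain (grid : List (List Char)) (x y dx dy : Int) :
    ∀ (m : Nat) (cx cy : Int),
      pvStepA grid x y dx dy cx cy m =
        if pvChain grid dx dy cx cy m then (cx + dx * m, cy + dy * m) else (x, y) := by
  intro m
  induction m with
  | zero => intro cx cy; simp [pvStepA, pvChain]
  | succ m ih =>
    intro cx cy
    simp only [pvStepA, pvChain, pvOk]
    by_cases h : (pvInRangeA grid (cx + dx) (cy + dy) && (pvCellA grid (cx + dx) (cy + dy) != 'X')) = true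
    · rw [if_pos h, ih]
      simp only [h, Bool.true_and]
      split_ifs with hc
      · simp only [Prod.mk.injEq]; constructor <;> (push_cast; ring)
      · rfl
    · rw [if_neg h]
      rw [Bool.not_eq_true] at h
      simp [h]

lemma pvChain_snoc (grid : List (List Char)) (dx dy : Int) :
    ∀ (m : Nat) (cx cy : Int),
      pvChain grid dx dy cx cy (m + 1) =
        (pvChain grid dx dy cx cy m && pvOk grid (cx + dx * (m + 1)) (cy + dy * (m + 1))) := by
  intro m
  induction m with
  | zero => intro cx cy; simp [pvChain, pvOk]
  | succ m ih =>
    intro cx cy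
    show (pvOk grid (cx + dx) (cy + dy) && pvChain grid dx dy (cx + dx) (cy + dy) (m + 1)) = _
    rw [ih]
    have h1 : cx + dx + dx * ((m : Int) + 1) = cx + dx * ((m : Int) + 1 + 1) := by ring
    have h2 : cy + dy + dy * ((m : Int) + 1) = cy + dy * ((m : Int) + 1 + 1) := by ring
    rw [h1, h2, ← Bool.and_assoc]
    rfl

-- chain as a universally quantified statement over the visited cells
lemma pvChain_iff (grid : List (List Char)) (dx dy : Int) :
    ∀ (m : Nat) (cx cy : Int),
      pvChain grid dx dy cx cy m = true ↔
        ∀ k : Nat, 1 ≤ k → k ≤ m → pvOk grid (cx + dx * k) (cy + dy * k) = true := by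
  intro m
  induction m with
  | zero =>
    intro cx cy
    simp only [pvChain, true_iff]
    intro k hk1 hk0; omega
  | succ m ih =>
    intro cx cy
    rw [pvChain_snoc, Bool.and_eq_true, ih]
    constructor
    · rintro ⟨h1, h2⟩ k hk1 hk2
      rcases Nat.lt_or_ge k (m + 1) with hk | hk
      · exact h1 k hk1 (by omega)
      · have : k = m + 1 := by omega
        subst this
        simpa using h2
    · intro h
      refine ⟨fun k hk1 hk2 => h k hk1 (by omega), ?_⟩
      have := h (m + 1) (by omega) (by omega)
      simpa using this

-- spec value of runs_before at position p
def pvRBV (line : List Char) : Nat → Nat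
  | 0 => 0
  | p + 1 => if line.getD p ' ' = 'X' then 0 else pvRBV line p + 1

lemma pvRunsBeforeGo_spec :
    ∀ (cs pre : List Char),
      pvRunsBeforeGo ((pvRBV (pre ++ cs) pre.length : Nat) : Int) cs =
        (List.range cs.length).map (fun k => ((pvRBV (pre ++ cs) (pre.length + k) : Nat) : Int)) := by
  intro cs
  induction cs with
  | nil => intro pre; simp [pvRunsBeforeGo]
  | cons c cs ih =>
    intro pre
    have hc : (pre ++ c :: cs).getD pre.length ' ' = c := by
      simp [List.getD_eq_getElem?_getD, List.getElem?_append_right (Nat.le_refl _)]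
    have hacc : (if c = 'X' then (0 : Int) else ((pvRBV (pre ++ c :: cs) pre.length : Nat) : Int) + 1)
        = ((pvRBV (pre ++ c :: cs) (pre.length + 1) : Nat) : Int) := by
      show _ = ((pvRBV (pre ++ c :: cs) (pre.length + 1) : Nat) : Int)
      rw [show pvRBV (pre ++ c :: cs) (pre.length + 1)
            = if (pre ++ c :: cs).getD pre.length ' ' = 'X' then 0
              else pvRBV (pre ++ c :: cs) pre.length + 1 from rfl, hc]
      split_ifs <;> push_cast <;> ring
    have ih' := ih (pre ++ [c])
    rw [show (pre ++ [c]) ++ cs = pre ++ c :: cs by simp] at ih'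
    simp only [List.length_append, List.length_cons, List.length_nil] at ih'
    calc pvRunsBeforeGo ((pvRBV (pre ++ c :: cs) pre.length : Nat) : Int) (c :: cs)
        = ((pvRBV (pre ++ c :: cs) pre.length : Nat) : Int) ::
            pvRunsBeforeGo ((pvRBV (pre ++ c :: cs) (pre.length + 1) : Nat) : Int) cs := by
          rw [pvRunsBeforeGo, hacc]
      _ = _ := by
          rw [ih', List.length_cons, List.range_succ_eq_map]
          simp only [List.map_cons, List.map_map, Function.comp_def, Nat.add_zero]
          refine congrArg₂ _ rfl (List.map_congr_left ?_)
          intro k _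
          congr 2
          omega

lemma pvRunsBefore_eq (line : List Char) :
    pvRunsBefore line = (List.range line.length).map (fun p => ((pvRBV line p : Nat) : Int)) := by
  have := pvRunsBeforeGo_spec line []
  simpa [pvRunsBefore, pvRBV] using this

lemma pvRBV_iff (line : List Char) :
    ∀ (p m : Nat),
      m ≤ pvRBV line p ↔
        ∀ k : Nat, 1 ≤ k → k ≤ m → k ≤ p ∧ line.getD (p - k) ' ' ≠ 'X' := by
  intro p
  induction p with
  | zero =>
    intro m
    constructor
    · intro h k hk1 hk2
      simp [pvRBV] at h
      omega
    · intro h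
      by_cases hm : m = 0
      · simp [hm]
      · have := h 1 (by omega) (by omega)
        omega
  | succ p ih =>
    intro m
    by_cases hx : line.getD p ' ' = 'X'
    · rw [show pvRBV line (p + 1) = 0 by rw [show pvRBV line (p + 1) = if line.getD p ' ' = 'X' then 0 else pvRBV line p + 1 from rfl, if_pos hx]]
      constructor
      · intro h k hk1 hk2; omega
      · intro h
        by_contra hm
        have := (h 1 (by omega) (by omega)).2
        rw [Nat.add_sub_cancel] at this
        exact this hx
    · rw [show pvRBV line (p + 1) = pvRBV line p + 1 by rw [show pvRBV line (p + 1) = if line.getD p ' ' = 'X' then 0 else pvRBV line p + 1 from rfl, if_neg hx]]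
      cases m with
      | zero => simp; intro k h1 h2; omega
      | succ m' =>
        rw [Nat.succ_le_succ_iff, ih m']
        constructor
        · intro h k hk1 hk2
          cases k with
          | zero => omega
          | succ k' =>
            cases k' with
            | zero =>
              refine ⟨by omega, ?_⟩
              simpa [Nat.add_sub_cancel] using hx
            | succ k'' =>
              have := h (k'' + 1) (by omega) (by omega)
              refine ⟨by omega, ?_⟩
              have heq : p + 1 - (k'' + 1 + 1) = p - (k'' + 1) := by omega
              rw [heq]
              exact this.2
        · intro h k hk1 hk2
          have := h (k + 1) (by omega) (by omega)
          refine ⟨by omega, ?_⟩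
          have heq : p - k = p + 1 - (k + 1) := by omega
          rw [heq]
          exact this.2

lemma pvRunsBefore_length (line : List Char) : (pvRunsBefore line).length = line.length := by
  rw [pvRunsBefore_eq]; simp

lemma pvBwd_char (line : List Char) (p : Nat) (hp : p < line.length) (n : Nat) :
    ((n : Int) ≤ PySem.List.pyGetD (pvRunsBefore line) (p : Int) 0) ↔
      ∀ k : Nat, 1 ≤ k → k ≤ n → k ≤ p ∧ line.getD (p - k) ' ' ≠ 'X' := by
  rw [PySem.List.pyGetD_natCast, pvRunsBefore_eq]
  rw [List.getD_eq_getElem?_getD, List.getElem?_map, List.getElem?_range hp]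
  simp only [Option.map_some, Option.getD_some, Nat.cast_le]
  exact pvRBV_iff line p n

lemma pvRev_getD (line : List Char) (i : Nat) (hi : i < line.length) :
    line.reverse.getD i ' ' = line.getD (line.length - 1 - i) ' ' := by
  rw [List.getD_eq_getElem?_getD, List.getD_eq_getElem?_getD, List.getElem?_reverse hi]

lemma pvFwd_char (line : List Char) (p : Nat) (hp : p < line.length) (n : Nat) :
    ((n : Int) ≤ PySem.List.pyGetD (pvRunsAfter line) (p : Int) 0) ↔
      ∀ k : Nat, 1 ≤ k → k ≤ n → p + k < line.length ∧ line.getD (p + k) ' ' ≠ 'X' := by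
  have hlen : (pvRunsBefore line.reverse).length = line.length := by
    rw [pvRunsBefore_length, List.length_reverse]
  rw [pvRunsAfter, PySem.List.pyGetD_natCast, List.getD_eq_getElem?_getD,
    List.getElem?_reverse (by omega : p < (pvRunsBefore line.reverse).length),
    ← List.getD_eq_getElem?_getD, hlen]
  have hq : line.length - 1 - p < line.reverse.length := by
    rw [List.length_reverse]; omega
  have := pvBwd_char line.reverse (line.length - 1 - p) hq n
  rw [PySem.List.pyGetD_natCast] at this
  rw [this]
  constructor
  · intro h k hk1 hkn
    obtain ⟨hkle, hne⟩ := h k hk1 hkn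
    have hlt : p + k < line.length := by omega
    refine ⟨hlt, ?_⟩
    have := pvRev_getD line (line.length - 1 - p - k) (by omega)
    rw [this] at hne
    rwa [show line.length - 1 - (line.length - 1 - p - k) = p + k by omega] at hne
  · intro h k hk1 hkn
    obtain ⟨hlt, hne⟩ := h k hk1 hkn
    refine ⟨by omega, ?_⟩
    rw [pvRev_getD line (line.length - 1 - p - k) (by omega),
      show line.length - 1 - (line.length - 1 - p - k) = p + k by omega]
    exact hne

lemma pvOk_nat (grid : List (List Char)) (i j : Nat) :
    pvOk grid (i : Int) (j : Int) = true ↔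
      (i < grid.length ∧ j < (PySem.List.pyGetD grid 0 []).length ∧
        (grid.getD i []).getD j ' ' ≠ 'X') := by
  unfold pvOk pvInRangeA pvCellA
  simp [PySem.List.len_eq, and_assoc]

lemma pvMinLen (grid : List (List Char)) (hne : grid ≠ [])
    (hrow : ∀ r ∈ grid, r.length = (PySem.List.pyGetD grid 0 []).length) :
    (grid.map List.length).min? = some (PySem.List.pyGetD grid 0 []).length := by
  have hrep : grid.map List.length
      = List.replicate grid.length (PySem.List.pyGetD grid 0 []).length := by
    apply List.eq_replicate_iff.2
    refine ⟨by simp, ?_⟩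
    intro b hb
    obtain ⟨r, hr, rfl⟩ := List.mem_map.1 hb
    exact hrow r hr
  rw [hrep]
  obtain ⟨a, t, rfl⟩ := List.exists_cons_of_ne_nil hne
  rw [List.length_cons, List.replicate_succ, List.min?_cons']
  congr 1
  generalize (PySem.List.pyGetD (a :: t) 0 []).length = c
  induction t.length with
  | zero => simp
  | succ m ihm => rw [List.replicate_succ, List.foldl_cons, min_self]; exact ihm

lemma pvTranspose_length (grid : List (List Char)) (hne : grid ≠ [])
    (hrow : ∀ r ∈ grid, r.length = (PySem.List.pyGetD grid 0 []).length) :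
    (pvTranspose grid).length = (PySem.List.pyGetD grid 0 []).length := by
  rw [pvTranspose, pvMinLen grid hne hrow]
  simp

lemma pvTranspose_getD (grid : List (List Char)) (hne : grid ≠ [])
    (hrow : ∀ r ∈ grid, r.length = (PySem.List.pyGetD grid 0 []).length)
    (y : Nat) (hy : y < (PySem.List.pyGetD grid 0 []).length) :
    (pvTranspose grid).getD y [] = grid.map (fun r => r.getD y ' ') := by
  rw [pvTranspose, pvMinLen grid hne hrow]
  rw [List.getD_eq_getElem?_getD, List.getElem?_map, List.getElem?_range hy]
  simp

lemma pvMapGetD {α β : Type} (l : List α) (f : α → β) (dα : α) (dβ : β) (i : Nat) (hi : i < l.length) :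
    PySem.List.pyGetD (l.map f) (i : Int) dβ = f (l.getD i dα) := by
  rw [PySem.List.pyGetD_natCast, List.getD_eq_getElem?_getD, List.getElem?_map,
    List.getElem?_eq_getElem hi]
  simp [List.getD_eq_getElem?_getD, List.getElem?_eq_getElem hi]

lemma pvRowLen (grid : List (List Char))
    (hrow : ∀ r ∈ grid, r.length = (PySem.List.pyGetD grid 0 []).length)
    (i : Nat) (hi : i < grid.length) :
    (grid.getD i []).length = (PySem.List.pyGetD grid 0 []).length := by
  apply hrow
  rw [List.getD_eq_getElem?_getD, List.getElem?_eq_getElem hi]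
  exact List.getElem_mem hi

lemma pvColGetD (grid : List (List Char)) (y i : Nat) (hi : i < grid.length) :
    (grid.map (fun r => r.getD y ' ')).getD i ' ' = (grid.getD i []).getD y ' ' := by
  rw [List.getD_eq_getElem?_getD, List.getElem?_map, List.getElem?_eq_getElem hi]
  simp [List.getD_eq_getElem?_getD, List.getElem?_eq_getElem hi]

lemma pvE_iff (grid : List (List Char))
    (hrow : ∀ r ∈ grid, r.length = (PySem.List.pyGetD grid 0 []).length)
    (x y n : Nat) (hx : x < grid.length) (hy : y < (PySem.List.pyGetD grid 0 []).length) :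
    ((n : Int) ≤ PySem.List.pyGetD (PySem.List.pyGetD (grid.map pvRunsAfter) (x : Int) []) (y : Int) 0
      ↔ ∀ k : Nat, 1 ≤ k → k ≤ n → pvOk grid (x : Int) ((y : Int) + (k : Int)) = true) := by
  have hlen := pvRowLen grid hrow x hx
  rw [pvMapGetD grid pvRunsAfter [] [] x hx,
    pvFwd_char (grid.getD x []) y (by omega) n]
  refine forall_congr' fun k => forall_congr' fun hk1 => forall_congr' fun hkn => ?_
  rw [show ((y : Int) + (k : Int)) = (((y + k : Nat)) : Int) by push_cast; ring, pvOk_nat]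
  constructor
  · rintro ⟨h1, h2⟩; exact ⟨hx, by omega, h2⟩
  · rintro ⟨-, h1, h2⟩; exact ⟨by omega, h2⟩

lemma pvW_iff (grid : List (List Char))
    (hrow : ∀ r ∈ grid, r.length = (PySem.List.pyGetD grid 0 []).length)
    (x y n : Nat) (hx : x < grid.length) (hy : y < (PySem.List.pyGetD grid 0 []).length) :
    ((n : Int) ≤ PySem.List.pyGetD (PySem.List.pyGetD (grid.map pvRunsBefore) (x : Int) []) (y : Int) 0
      ↔ ∀ k : Nat, 1 ≤ k → k ≤ n → pvOk grid (x : Int) ((y : Int) - (k : Int)) = true) := by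
  have hlen := pvRowLen grid hrow x hx
  rw [pvMapGetD grid pvRunsBefore [] [] x hx,
    pvBwd_char (grid.getD x []) y (by omega) n]
  refine forall_congr' fun k => forall_congr' fun hk1 => forall_congr' fun hkn => ?_
  by_cases hky : k ≤ y
  · rw [show ((y : Int) - (k : Int)) = (((y - k : Nat)) : Int) by omega, pvOk_nat]
    constructor
    · rintro ⟨h1, h2⟩; exact ⟨hx, by omega, h2⟩
    · rintro ⟨-, h1, h2⟩; exact ⟨by omega, h2⟩
  · constructor
    · rintro ⟨h1, -⟩; omega
    · intro h
      exfalso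
      have : pvOk grid (x : Int) ((y : Int) - (k : Int)) = true := h
      unfold pvOk pvInRangeA at this
      simp at this
      omega

lemma pvS_iff (grid : List (List Char)) (hne : grid ≠ [])
    (hrow : ∀ r ∈ grid, r.length = (PySem.List.pyGetD grid 0 []).length)
    (x y n : Nat) (hx : x < grid.length) (hy : y < (PySem.List.pyGetD grid 0 []).length) :
    ((n : Int) ≤ PySem.List.pyGetD (PySem.List.pyGetD ((pvTranspose grid).map pvRunsAfter) (y : Int) []) (x : Int) 0
      ↔ ∀ k : Nat, 1 ≤ k → k ≤ n → pvOk grid ((x : Int) + (k : Int)) (y : Int) = true) := by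
  have hty : y < (pvTranspose grid).length := by rw [pvTranspose_length grid hne hrow]; omega
  rw [pvMapGetD (pvTranspose grid) pvRunsAfter [] [] y hty, pvTranspose_getD grid hne hrow y hy,
    pvFwd_char (grid.map (fun r => r.getD y ' ')) x (by simpa using hx) n]
  refine forall_congr' fun k => forall_congr' fun hk1 => forall_congr' fun hkn => ?_
  rw [show ((x : Int) + (k : Int)) = (((x + k : Nat)) : Int) by push_cast; ring, pvOk_nat]
  simp only [List.length_map]
  constructor
  · rintro ⟨h1, h2⟩
    rw [pvColGetD grid y (x + k) h1] at h2
    exact ⟨h1, by omega, h2⟩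
  · rintro ⟨h1, -, h2⟩
    rw [pvColGetD grid y (x + k) h1]
    exact ⟨h1, h2⟩

lemma pvN_iff (grid : List (List Char)) (hne : grid ≠ [])
    (hrow : ∀ r ∈ grid, r.length = (PySem.List.pyGetD grid 0 []).length)
    (x y n : Nat) (hx : x < grid.length) (hy : y < (PySem.List.pyGetD grid 0 []).length) :
    ((n : Int) ≤ PySem.List.pyGetD (PySem.List.pyGetD ((pvTranspose grid).map pvRunsBefore) (y : Int) []) (x : Int) 0
      ↔ ∀ k : Nat, 1 ≤ k → k ≤ n → pvOk grid ((x : Int) - (k : Int)) (y : Int) = true) := by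
  have hty : y < (pvTranspose grid).length := by rw [pvTranspose_length grid hne hrow]; omega
  rw [pvMapGetD (pvTranspose grid) pvRunsBefore [] [] y hty, pvTranspose_getD grid hne hrow y hy,
    pvBwd_char (grid.map (fun r => r.getD y ' ')) x (by simpa using hx) n]
  refine forall_congr' fun k => forall_congr' fun hk1 => forall_congr' fun hkn => ?_
  by_cases hkx : k ≤ x
  · rw [show ((x : Int) - (k : Int)) = (((x - k : Nat)) : Int) by omega, pvOk_nat]
    constructor
    · rintro ⟨h1, h2⟩
      rw [pvColGetD grid y (x - k) (by omega)] at h2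
      exact ⟨by omega, by omega, h2⟩
    · rintro ⟨h1, -, h2⟩
      rw [pvColGetD grid y (x - k) (by omega)]
      exact ⟨hkx, h2⟩
  · constructor
    · rintro ⟨h1, -⟩; omega
    · intro h
      exfalso
      have : pvOk grid ((x : Int) - (k : Int)) (y : Int) = true := h
      unfold pvOk pvInRangeA at this
      simp at this
      omega


-- pointwise-equal cell tests give equal chains
lemma pvChain_congr (G C : List (List Char)) (hOk : ∀ a b : Int, pvOk G a b = pvOk C a b)
    (dx dy : Int) : ∀ (m : Nat) (cx cy : Int),
      pvChain G dx dy cx cy m = pvChain C dx dy cx cy m := by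
  intro m
  induction m with
  | zero => intro cx cy; rfl
  | succ m ih => intro cx cy; simp only [pvChain, hOk, ih]

-- cropping every row to the first row's length does not change A's cell test
lemma pvOk_crop (G : List (List Char)) (cols : Nat)
    (hc : (PySem.List.pyGetD G 0 []).length = cols) :
    ∀ a b : Int, pvOk G a b = pvOk (G.map (List.take cols)) a b := by
  intro a b
  have hlen : (G.map (List.take cols)).length = G.length := by simp
  have hfirst : PySem.List.pyGetD (G.map (List.take cols)) 0 [] = (PySem.List.pyGetD G 0 []).take cols := by
    cases G with
    | nil => simp [show PySem.List.pyGetD ([] : List (List Char)) 0 [] = [] from rfl]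
    | cons g gs => simp [PySem.List.pyGetD_zero_cons]
  have hfl : (PySem.List.pyGetD (G.map (List.take cols)) 0 []).length = cols := by
    rw [hfirst, List.length_take, hc]
    omega
  have hIR : pvInRangeA G a b = pvInRangeA (G.map (List.take cols)) a b := by
    unfold pvInRangeA
    rw [PySem.List.len_eq, PySem.List.len_eq, PySem.List.len_eq, PySem.List.len_eq, hlen, hfl, hc]
  unfold pvOk
  rw [← hIR]
  cases hir : pvInRangeA G a b with
  | false => simp
  | true =>
    simp only [Bool.true_and]
    unfold pvInRangeA at hir
    simp only [PySem.List.len_eq, hc, Bool.and_eq_true, decide_eq_true_eq] at hir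
    obtain ⟨⟨⟨ha0, haL⟩, hb0⟩, hbc⟩ := hir
    obtain ⟨na, rfl⟩ : ∃ na : Nat, a = (na : Int) := ⟨a.toNat, by omega⟩
    obtain ⟨nb, rfl⟩ : ∃ nb : Nat, b = (nb : Int) := ⟨b.toNat, by omega⟩
    have hna : na < G.length := by exact_mod_cast haL
    have hnb : nb < cols := by exact_mod_cast hbc
    unfold pvCellA
    rw [pvMapGetD G (List.take cols) [] [] na hna]
    have hcell : PySem.List.pyGetD (List.take cols (G.getD na [])) ((nb : Nat) : Int) ' '
        = PySem.List.pyGetD (G.getD na []) ((nb : Nat) : Int) ' ' := by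
      rw [PySem.List.pyGetD_natCast, PySem.List.pyGetD_natCast,
        List.getD_eq_getElem?_getD, List.getD_eq_getElem?_getD]
      congr 1
      exact List.getElem?_take_of_lt hnb
    rw [hcell, PySem.List.pyGetD_natCast (xs := G)]

-- route well-formedness (the per-route conjunct of Pre_)
def pvWF (route : String) : Prop :=
  (PySem.Str.split₀ route).length = 2 ∧
  PySem.List.pyGetD (PySem.Str.split₀ route) 0 "" ∈ (["E", "W", "S", "N"] : List String) ∧
  (PySem.Int.ofStr? (PySem.List.pyGetD (PySem.Str.split₀ route) 1 "")).isSome = true ∧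
  0 ≤ (PySem.Int.ofStr? (PySem.List.pyGetD (PySem.Str.split₀ route) 1 "")).getD 0

-- the loop bodies of the two ports, named for the fold induction
def pvStA (grid : List (List Char)) (st : Int × Int) (route : String) : Int × Int :=
  let parts := PySem.Str.split₀ route
  let dist := (PySem.Int.ofStr? (PySem.List.pyGetD parts 1 "")).getD 0
  let md := (((PySem.Dict.ofList [("E", 0), ("W", 1), ("S", 2), ("N", 3)]) : PySem.Dict String Int).get? (PySem.List.pyGetD parts 0 "")).getD 0
  let dx := PySem.List.pyGetD ([0, 0, 1, -1] : List Int) md 0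
  let dy := PySem.List.pyGetD ([1, -1, 0, 0] : List Int) md 0
  pvStepA grid st.1 st.2 dx dy st.1 st.2 dist.toNat

def pvStB (grid : List (List Char)) (st : Int × Int) (route : String) : Int × Int :=
  let parts := PySem.Str.split₀ route
  let d := PySem.List.pyGetD parts 0 ""
  let n := (PySem.Int.ofStr? (PySem.List.pyGetD parts 1 "")).getD 0
  if d = "E" ∧ n ≤ PySem.List.pyGetD (PySem.List.pyGetD (grid.map pvRunsAfter) st.1 []) st.2 0 then
    (st.1, st.2 + n)
  else if d = "W" ∧ n ≤ PySem.List.pyGetD (PySem.List.pyGetD (grid.map pvRunsBefore) st.1 []) st.2 0 then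
    (st.1, st.2 - n)
  else if d = "S" ∧ n ≤ PySem.List.pyGetD (PySem.List.pyGetD ((pvTranspose grid).map pvRunsAfter) st.2 []) st.1 0 then
    (st.1 + n, st.2)
  else if d = "N" ∧ n ≤ PySem.List.pyGetD (PySem.List.pyGetD ((pvTranspose grid).map pvRunsBefore) st.2 []) st.1 0 then
    (st.1 - n, st.2)
  else st

-- one route: the two loop bodies agree and preserve in-bounds coordinates
lemma pvStep_both (G C : List (List Char)) (hne : C ≠ [])
    (hrow : ∀ r ∈ C, r.length = (PySem.List.pyGetD C 0 []).length)
    (hOk : ∀ a b : Int, pvOk G a b = pvOk C a b)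
    (route : String) (hwf : pvWF route) (x y : Nat)
    (hx : x < C.length) (hy : y < (PySem.List.pyGetD C 0 []).length) :
    ∃ x' y' : Nat, pvStA G ((x : Int), (y : Int)) route = ((x' : Int), (y' : Int)) ∧
      pvStB C ((x : Int), (y : Int)) route = ((x' : Int), (y' : Int)) ∧
      x' < C.length ∧ y' < (PySem.List.pyGetD C 0 []).length := by
  obtain ⟨-, hd4, -, hn⟩ := hwf
  obtain ⟨m, hm⟩ : ∃ m : Nat,
      (PySem.Int.ofStr? (PySem.List.pyGetD (PySem.Str.split₀ route) 1 "")).getD 0 = (m : Int) :=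
    ⟨_, (Int.toNat_of_nonneg hn).symm⟩
  simp only [List.mem_cons, List.not_mem_nil, or_false] at hd4
  rcases hd4 with hd | hd | hd | hd
  · -- E : dx = 0, dy = 1
    have hAeq : pvStA G ((x : Int), (y : Int)) route
        = if pvChain C 0 1 (x : Int) (y : Int) m
          then ((x : Int) + 0 * (m : Int), (y : Int) + 1 * (m : Int)) else ((x : Int), (y : Int)) := by
      simp only [pvStA, hd, hm,
        show (((PySem.Dict.ofList [("E", 0), ("W", 1), ("S", 2), ("N", 3)]) : PySem.Dict String Int).get? "E").getD 0 = 0 from rfl,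
        show PySem.List.pyGetD ([0, 0, 1, -1] : List Int) 0 0 = (0 : Int) from rfl,
        show PySem.List.pyGetD ([1, -1, 0, 0] : List Int) 0 0 = (1 : Int) from rfl]
      rw [show ((m : Int)).toNat = m by simp, pvStepA_eq_chain G _ _ 0 1 m _ _,
        pvChain_congr G C hOk 0 1 m]
    have hiff : pvChain C 0 1 (x : Int) (y : Int) m = true ↔
        ((m : Int) ≤ PySem.List.pyGetD (PySem.List.pyGetD (C.map pvRunsAfter) (x : Int) []) (y : Int) 0) := by
      rw [pvChain_iff]
      simp only [zero_mul, add_zero, one_mul, neg_one_mul, ← sub_eq_add_neg]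
      exact (pvE_iff C hrow x y m hx hy).symm
    have hBeq : pvStB C ((x : Int), (y : Int)) route
        = if ((m : Int) ≤ PySem.List.pyGetD (PySem.List.pyGetD (C.map pvRunsAfter) (x : Int) []) (y : Int) 0)
          then ((x : Int), (y : Int) + (m : Int)) else ((x : Int), (y : Int)) := by
      simp only [pvStB, hd, hm]
      by_cases hp : ((m : Int) ≤ PySem.List.pyGetD (PySem.List.pyGetD (C.map pvRunsAfter) (x : Int) []) (y : Int) 0)
      · rw [if_pos ⟨by simp, hp⟩, if_pos hp]
      · rw [if_neg (fun h => hp h.2), if_neg (by simp), if_neg (by simp), if_neg (by simp), if_neg hp]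
    by_cases hc : pvChain C 0 1 (x : Int) (y : Int) m = true
    · have hp := hiff.1 hc
      have hbound : y + m < (PySem.List.pyGetD C 0 []).length := by
        rcases Nat.eq_zero_or_pos m with hm0 | hm0
        · omega
        · have hok := (pvChain_iff C 0 1 m (x : Int) (y : Int)).1 hc m (by omega) (le_refl m)
          simp only [zero_mul, add_zero, one_mul] at hok
          rw [show ((y : Int) + (m : Int)) = (((y + m : Nat)) : Int) by push_cast; ring, pvOk_nat] at hok
          exact hok.2.1
      refine ⟨x, y + m, ?_, ?_, hx, hbound⟩
      · rw [hAeq, if_pos hc]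
        refine Prod.ext ?_ ?_ <;> simp <;> omega
      · rw [hBeq, if_pos hp]
        refine Prod.ext ?_ ?_ <;> simp <;> omega
    · have hp : ¬ ((m : Int) ≤ PySem.List.pyGetD (PySem.List.pyGetD (C.map pvRunsAfter) (x : Int) []) (y : Int) 0) :=
        fun h => hc (hiff.2 h)
      exact ⟨x, y, by rw [hAeq, if_neg hc], by rw [hBeq, if_neg hp], hx, hy⟩
  · -- W : dx = 0, dy = (-1)
    have hAeq : pvStA G ((x : Int), (y : Int)) route
        = if pvChain C 0 (-1) (x : Int) (y : Int) m
          then ((x : Int) + 0 * (m : Int), (y : Int) + (-1) * (m : Int)) else ((x : Int), (y : Int)) := by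
      simp only [pvStA, hd, hm,
        show (((PySem.Dict.ofList [("E", 0), ("W", 1), ("S", 2), ("N", 3)]) : PySem.Dict String Int).get? "W").getD 0 = 1 from rfl,
        show PySem.List.pyGetD ([0, 0, 1, -1] : List Int) 1 0 = (0 : Int) from rfl,
        show PySem.List.pyGetD ([1, -1, 0, 0] : List Int) 1 0 = ((-1) : Int) from rfl]
      rw [show ((m : Int)).toNat = m by simp, pvStepA_eq_chain G _ _ 0 (-1) m _ _,
        pvChain_congr G C hOk 0 (-1) m]
    have hiff : pvChain C 0 (-1) (x : Int) (y : Int) m = true ↔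
        ((m : Int) ≤ PySem.List.pyGetD (PySem.List.pyGetD (C.map pvRunsBefore) (x : Int) []) (y : Int) 0) := by
      rw [pvChain_iff]
      simp only [zero_mul, add_zero, one_mul, neg_one_mul, ← sub_eq_add_neg]
      exact (pvW_iff C hrow x y m hx hy).symm
    have hBeq : pvStB C ((x : Int), (y : Int)) route
        = if ((m : Int) ≤ PySem.List.pyGetD (PySem.List.pyGetD (C.map pvRunsBefore) (x : Int) []) (y : Int) 0)
          then ((x : Int), (y : Int) - (m : Int)) else ((x : Int), (y : Int)) := by
      simp only [pvStB, hd, hm]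
      by_cases hp : ((m : Int) ≤ PySem.List.pyGetD (PySem.List.pyGetD (C.map pvRunsBefore) (x : Int) []) (y : Int) 0)
      · rw [if_neg (by simp), if_pos ⟨by simp, hp⟩, if_pos hp]
      · rw [if_neg (by simp), if_neg (fun h => hp h.2), if_neg (by simp), if_neg (by simp), if_neg hp]
    by_cases hc : pvChain C 0 (-1) (x : Int) (y : Int) m = true
    · have hp := hiff.1 hc
      have hmy : m ≤ y := by
        rcases Nat.eq_zero_or_pos m with hm0 | hm0
        · omega
        · have hok := (pvChain_iff C 0 (-1) m (x : Int) (y : Int)).1 hc m (by omega) (le_refl m)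
          simp only [zero_mul, add_zero, neg_one_mul, ← sub_eq_add_neg] at hok
          unfold pvOk pvInRangeA at hok
          simp at hok
          omega
      refine ⟨x, y - m, ?_, ?_, hx, by omega⟩
      · rw [hAeq, if_pos hc]
        refine Prod.ext ?_ ?_ <;> simp <;> omega
      · rw [hBeq, if_pos hp]
        refine Prod.ext ?_ ?_ <;> simp <;> omega
    · have hp : ¬ ((m : Int) ≤ PySem.List.pyGetD (PySem.List.pyGetD (C.map pvRunsBefore) (x : Int) []) (y : Int) 0) :=
        fun h => hc (hiff.2 h)
      exact ⟨x, y, by rw [hAeq, if_neg hc], by rw [hBeq, if_neg hp], hx, hy⟩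
  · -- S : dx = 1, dy = 0
    have hAeq : pvStA G ((x : Int), (y : Int)) route
        = if pvChain C 1 0 (x : Int) (y : Int) m
          then ((x : Int) + 1 * (m : Int), (y : Int) + 0 * (m : Int)) else ((x : Int), (y : Int)) := by
      simp only [pvStA, hd, hm,
        show (((PySem.Dict.ofList [("E", 0), ("W", 1), ("S", 2), ("N", 3)]) : PySem.Dict String Int).get? "S").getD 0 = 2 from rfl,
        show PySem.List.pyGetD ([0, 0, 1, -1] : List Int) 2 0 = (1 : Int) from rfl,
        show PySem.List.pyGetD ([1, -1, 0, 0] : List Int) 2 0 = (0 : Int) from rfl]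
      rw [show ((m : Int)).toNat = m by simp, pvStepA_eq_chain G _ _ 1 0 m _ _,
        pvChain_congr G C hOk 1 0 m]
    have hiff : pvChain C 1 0 (x : Int) (y : Int) m = true ↔
        ((m : Int) ≤ PySem.List.pyGetD (PySem.List.pyGetD ((pvTranspose C).map pvRunsAfter) (y : Int) []) (x : Int) 0) := by
      rw [pvChain_iff]
      simp only [zero_mul, add_zero, one_mul, neg_one_mul, ← sub_eq_add_neg]
      exact (pvS_iff C hne hrow x y m hx hy).symm
    have hBeq : pvStB C ((x : Int), (y : Int)) route
        = if ((m : Int) ≤ PySem.List.pyGetD (PySem.List.pyGetD ((pvTranspose C).map pvRunsAfter) (y : Int) []) (x : Int) 0)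
          then ((x : Int) + (m : Int), (y : Int)) else ((x : Int), (y : Int)) := by
      simp only [pvStB, hd, hm]
      by_cases hp : ((m : Int) ≤ PySem.List.pyGetD (PySem.List.pyGetD ((pvTranspose C).map pvRunsAfter) (y : Int) []) (x : Int) 0)
      · rw [if_neg (by simp), if_neg (by simp), if_pos ⟨by simp, hp⟩, if_pos hp]
      · rw [if_neg (by simp), if_neg (by simp), if_neg (fun h => hp h.2), if_neg (by simp), if_neg hp]
    by_cases hc : pvChain C 1 0 (x : Int) (y : Int) m = true
    · have hp := hiff.1 hc
      have hbound : x + m < C.length := by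
        rcases Nat.eq_zero_or_pos m with hm0 | hm0
        · omega
        · have hok := (pvChain_iff C 1 0 m (x : Int) (y : Int)).1 hc m (by omega) (le_refl m)
          simp only [zero_mul, add_zero, one_mul] at hok
          rw [show ((x : Int) + (m : Int)) = (((x + m : Nat)) : Int) by push_cast; ring, pvOk_nat] at hok
          exact hok.1
      refine ⟨x + m, y, ?_, ?_, hbound, hy⟩
      · rw [hAeq, if_pos hc]
        refine Prod.ext ?_ ?_ <;> simp <;> omega
      · rw [hBeq, if_pos hp]
        refine Prod.ext ?_ ?_ <;> simp <;> omega
    · have hp : ¬ ((m : Int) ≤ PySem.List.pyGetD (PySem.List.pyGetD ((pvTranspose C).map pvRunsAfter) (y : Int) []) (x : Int) 0) :=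
        fun h => hc (hiff.2 h)
      exact ⟨x, y, by rw [hAeq, if_neg hc], by rw [hBeq, if_neg hp], hx, hy⟩
  · -- N : dx = (-1), dy = 0
    have hAeq : pvStA G ((x : Int), (y : Int)) route
        = if pvChain C (-1) 0 (x : Int) (y : Int) m
          then ((x : Int) + (-1) * (m : Int), (y : Int) + 0 * (m : Int)) else ((x : Int), (y : Int)) := by
      simp only [pvStA, hd, hm,
        show (((PySem.Dict.ofList [("E", 0), ("W", 1), ("S", 2), ("N", 3)]) : PySem.Dict String Int).get? "N").getD 0 = 3 from rfl,
        show PySem.List.pyGetD ([0, 0, 1, -1] : List Int) 3 0 = ((-1) : Int) from rfl,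
        show PySem.List.pyGetD ([1, -1, 0, 0] : List Int) 3 0 = (0 : Int) from rfl]
      rw [show ((m : Int)).toNat = m by simp, pvStepA_eq_chain G _ _ (-1) 0 m _ _,
        pvChain_congr G C hOk (-1) 0 m]
    have hiff : pvChain C (-1) 0 (x : Int) (y : Int) m = true ↔
        ((m : Int) ≤ PySem.List.pyGetD (PySem.List.pyGetD ((pvTranspose C).map pvRunsBefore) (y : Int) []) (x : Int) 0) := by
      rw [pvChain_iff]
      simp only [zero_mul, add_zero, one_mul, neg_one_mul, ← sub_eq_add_neg]
      exact (pvN_iff C hne hrow x y m hx hy).symm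
    have hBeq : pvStB C ((x : Int), (y : Int)) route
        = if ((m : Int) ≤ PySem.List.pyGetD (PySem.List.pyGetD ((pvTranspose C).map pvRunsBefore) (y : Int) []) (x : Int) 0)
          then ((x : Int) - (m : Int), (y : Int)) else ((x : Int), (y : Int)) := by
      simp only [pvStB, hd, hm]
      by_cases hp : ((m : Int) ≤ PySem.List.pyGetD (PySem.List.pyGetD ((pvTranspose C).map pvRunsBefore) (y : Int) []) (x : Int) 0)
      · rw [if_neg (by simp), if_neg (by simp), if_neg (by simp), if_pos ⟨by simp, hp⟩, if_pos hp]
      · rw [if_neg (by simp), if_neg (by simp), if_neg (by simp), if_neg (fun h => hp h.2), if_neg hp]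
    by_cases hc : pvChain C (-1) 0 (x : Int) (y : Int) m = true
    · have hp := hiff.1 hc
      have hmx : m ≤ x := by
        rcases Nat.eq_zero_or_pos m with hm0 | hm0
        · omega
        · have hok := (pvChain_iff C (-1) 0 m (x : Int) (y : Int)).1 hc m (by omega) (le_refl m)
          simp only [zero_mul, add_zero, neg_one_mul, ← sub_eq_add_neg] at hok
          unfold pvOk pvInRangeA at hok
          simp at hok
          omega
      refine ⟨x - m, y, ?_, ?_, by omega, hy⟩
      · rw [hAeq, if_pos hc]
        refine Prod.ext ?_ ?_ <;> simp <;> omega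
      · rw [hBeq, if_pos hp]
        refine Prod.ext ?_ ?_ <;> simp <;> omega
    · have hp : ¬ ((m : Int) ≤ PySem.List.pyGetD (PySem.List.pyGetD ((pvTranspose C).map pvRunsBefore) (y : Int) []) (x : Int) 0) :=
        fun h => hc (hiff.2 h)
      exact ⟨x, y, by rw [hAeq, if_neg hc], by rw [hBeq, if_neg hp], hx, hy⟩

lemma pvFold_both (G C : List (List Char)) (hne : C ≠ [])
    (hrow : ∀ r ∈ C, r.length = (PySem.List.pyGetD C 0 []).length)
    (hOk : ∀ a b : Int, pvOk G a b = pvOk C a b) :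
    ∀ (rs : List String), (∀ rt ∈ rs, pvWF rt) → ∀ (x y : Nat),
      x < C.length → y < (PySem.List.pyGetD C 0 []).length →
      ∃ x' y' : Nat, rs.foldl (pvStA G) ((x : Int), (y : Int)) = ((x' : Int), (y' : Int)) ∧
        rs.foldl (pvStB C) ((x : Int), (y : Int)) = ((x' : Int), (y' : Int)) := by
  intro rs
  induction rs with
  | nil => intro _ x y hx hy; exact ⟨x, y, rfl, rfl⟩
  | cons r rs ih =>
    intro hwf x y hx hy
    obtain ⟨x', y', hA, hB, hx', hy'⟩ :=
      pvStep_both G C hne hrow hOk r (hwf r (by simp)) x y hx hy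
    obtain ⟨x'', y'', hA2, hB2⟩ :=
      ih (fun rt hrt => hwf rt (by simp [hrt])) x' y' hx' hy'
    exact ⟨x'', y'', by rw [List.foldl_cons, hA, hA2], by rw [List.foldl_cons, hB, hB2]⟩

-- A's row scan is index of the first 'S'
lemma pvFindRowA_eq (r : List Char) :
    ∀ j : Int, pvFindRowA r j = (PySem.List.index? r 'S').map (fun k : Nat => j + (k : Int)) := by
  induction r with
  | nil => intro j; simp [pvFindRowA, PySem.List.index?]
  | cons c rest ih =>
    intro j
    by_cases hc : c = 'S'
    · subst hc
      rw [PySem.List.index?_cons_self]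
      simp [pvFindRowA]
    · rw [show pvFindRowA (c :: rest) j = pvFindRowA rest (j + 1) by simp [pvFindRowA, hc],
        PySem.List.index?_cons_of_ne rest hc, ih (j + 1), Option.map_map]
      congr 1
      funext k
      simp [Function.comp]
      push_cast
      ring


-- the two start searches agree
lemma pvStartB_eq' (grid : List (List Char)) :
    ∀ i0 : Int,
      (PySem.List.enumerate grid i0).findSome? (fun p =>
        if 'S' ∈ p.2 then (PySem.List.index? p.2 'S').map (fun j => (p.1, (j : Int))) else none)
        = pvFindA grid i0 := by
  induction grid with
  | nil => intro i0; simp [PySem.List.enumerate_nil, pvFindA]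
  | cons r rest ih =>
    intro i0
    rw [PySem.List.enumerate_cons, List.findSome?_cons]
    have hrowA : pvFindRowA r 0 = (PySem.List.index? r 'S').map (fun k => ((k : Nat) : Int)) := by
      rw [pvFindRowA_eq r 0]
      simp
    cases hidx : PySem.List.index? r 'S' with
    | none =>
      have hmem : 'S' ∉ r := (PySem.List.index?_eq_none_iff _ _).1 hidx
      rw [show pvFindA (r :: rest) i0 = pvFindA rest (i0 + 1) by
        simp [pvFindA, hrowA, show List.idxOf? 'S' r = none from by simpa using hidx]]
      simp only [hmem, if_neg]
      simpa using ih (i0 + 1)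
    | some k =>
      have hmem : 'S' ∈ r := by
        have : (PySem.List.index? r 'S').isSome = true := by rw [hidx]; rfl
        exact (PySem.List.index?_isSome_iff _ _).1 this
      rw [show pvFindA (r :: rest) i0 = some (i0, ((k : Nat) : Int)) by
        simp [pvFindA, hrowA, show List.idxOf? 'S' r = some k from by simpa using hidx]]
      simp [hmem, hidx]

lemma pvStartB_eq (grid : List (List Char)) : pvStartB grid = pvFindA grid 0 := by
  rw [pvStartB, pvStartB_eq' grid 0]

-- A's start search skips 'S'-free rows
lemma pvFindA_noS_append :
    ∀ (pre rest : List (List Char)) (i0 : Int), (∀ p ∈ pre, 'S' ∉ p) →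
      pvFindA (pre ++ rest) i0 = pvFindA rest (i0 + pre.length) := by
  intro pre
  induction pre with
  | nil => intro rest i0 _; simp
  | cons p ps ih =>
    intro rest i0 hpre
    have hidx : PySem.List.index? p 'S' = none :=
      (PySem.List.index?_eq_none_iff _ _).2 (hpre p (by simp))
    rw [List.cons_append,
      show pvFindA (p :: (ps ++ rest)) i0 = pvFindA (ps ++ rest) (i0 + 1) by
        simp [pvFindA, pvFindRowA_eq, show List.idxOf? 'S' p = none from by simpa using hidx],
      ih rest (i0 + 1) (fun q hq => hpre q (by simp [hq]))]
    congr 1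
    simp only [List.length_cons]
    push_cast
    ring

-- A's start search on a row whose first 'S' is at index j
lemma pvFindA_cons_S (r : List Char) (suf : List (List Char)) (j : Nat)
    (hj : PySem.List.index? r 'S' = some j) (i0 : Int) :
    pvFindA (r :: suf) i0 = some (i0, (j : Int)) := by
  simp [pvFindA, pvFindRowA_eq, show List.idxOf? 'S' r = some j from by simpa using hj]

-- cropping a row keeps the first 'S' when it lies inside the kept prefix
lemma pvIndex?_take (r : List Char) (cols j : Nat)
    (hj : PySem.List.index? r 'S' = some j) (hjc : j < cols) :
    PySem.List.index? (r.take cols) 'S' = some j := by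
  obtain ⟨rpre, rsuf, rfl, hlen, hnot⟩ := (PySem.List.index?_eq_some_iff _ _ _).1 hj
  have htake : (rpre ++ 'S' :: rsuf).take cols
      = rpre ++ 'S' :: rsuf.take (cols - j - 1) := by
    rw [List.take_append, List.take_of_length_le (by omega)]
    congr 1
    rw [show cols - rpre.length = (cols - j - 1) + 1 by omega]
    rfl
  rw [htake]
  exact (PySem.List.index?_eq_some_iff _ _ _).2 ⟨rpre, _, rfl, hlen, hnot⟩

theorem solution_spec : Claim_equal_solution := by
  intro park routes _ hPre
  obtain ⟨hpne, hfst, hrag, hroutes⟩ := hPre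
  unfold Spec_solution
  obtain ⟨q0, qr, hq⟩ := List.exists_cons_of_ne_nil hpne
  have hG0 : PySem.List.pyGetD (park.map String.toList) 0 [] = q0.toList := by
    rw [hq]; simp [PySem.List.pyGetD_zero_cons]
  -- decode the first-'S' condition of Pre_
  cases hfq : park.find? (fun s => decide ('S' ∈ s.toList)) with
  | none => rw [hfq] at hfst; simp [Option.any] at hfst
  | some s0 =>
  rw [hfq] at hfst
  simp only [Option.any_some] at hfst
  cases hix : PySem.List.index? s0.toList 'S' with
  | none => rw [hix] at hfst; simp [Option.any] at hfst
  | some j =>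
  rw [hix] at hfst
  simp only [Option.any_some, decide_eq_true_eq] at hfst
  have hj : j < q0.toList.length := by rw [hq] at hfst; simpa using hfst
  obtain ⟨-, pre, suf, hdec, hpre⟩ := List.find?_eq_some_iff_append.1 hfq
  have hGdec : park.map String.toList
      = pre.map String.toList ++ s0.toList :: suf.map String.toList := by
    rw [hdec]; simp
  have hpreG : ∀ p ∈ pre.map String.toList, 'S' ∉ p := by
    intro p hp
    obtain ⟨a, ha, rfl⟩ := List.mem_map.1 hp
    have := hpre a ha
    simpa using this
  have hstartG : pvFindA (park.map String.toList) 0 = some ((pre.length : Int), (j : Int)) := by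
    rw [hGdec, pvFindA_noS_append _ _ 0 hpreG, pvFindA_cons_S _ _ j hix]
    simp
  -- B's cropped grid
  have hne : (park.map String.toList).map (List.take q0.toList.length) ≠ [] := by
    rw [hq]; simp
  have hCdec : (park.map String.toList).map (List.take q0.toList.length)
      = (pre.map String.toList).map (List.take q0.toList.length) ++
        (s0.toList.take q0.toList.length) ::
        (suf.map String.toList).map (List.take q0.toList.length) := by
    rw [hGdec]; simp
  have hpreC : ∀ p ∈ (pre.map String.toList).map (List.take q0.toList.length), 'S' ∉ p := by
    intro p hp hSp
    obtain ⟨a, ha, rfl⟩ := List.mem_map.1 hp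
    exact hpreG a ha (List.take_subset _ _ hSp)
  have hixC : PySem.List.index? (s0.toList.take q0.toList.length) 'S' = some j :=
    pvIndex?_take _ _ j hix hj
  have hstartC : pvFindA ((park.map String.toList).map (List.take q0.toList.length)) 0
      = some ((pre.length : Int), (j : Int)) := by
    rw [hCdec, pvFindA_noS_append _ _ 0 hpreC, pvFindA_cons_S _ _ j hixC]
    simp
  have hfirstC : (PySem.List.pyGetD
      ((park.map String.toList).map (List.take q0.toList.length)) 0 []).length
      = q0.toList.length := by
    rw [hq]
    simp [PySem.List.pyGetD_zero_cons]
  have hi : pre.length < ((park.map String.toList).map (List.take q0.toList.length)).length := by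
    rw [hdec]; simp
  have hjcC : j < (PySem.List.pyGetD
      ((park.map String.toList).map (List.take q0.toList.length)) 0 []).length := by
    rw [hfirstC]; exact hj
  have hOk : ∀ a b : Int, pvOk (park.map String.toList) a b
      = pvOk ((park.map String.toList).map (List.take q0.toList.length)) a b :=
    pvOk_crop (park.map String.toList) q0.toList.length (by rw [hG0])
  have hcolsInt : PySem.Str.len (PySem.List.pyGetD park 0 "") = ((q0.toList.length : Nat) : Int) := by
    rw [hq, PySem.List.pyGetD_zero_cons, PySem.Str.len_eq]
  have hgridB : park.map (fun s => PySem.List.slice s.toList none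
      (some (PySem.Str.len (PySem.List.pyGetD park 0 "")))) =
      (park.map String.toList).map (List.take q0.toList.length) := by
    rw [hcolsInt, List.map_map]
    exact List.map_congr_left (fun s _ => PySem.List.slice_to_natCast _ _)
  have e1 : solution park routes
      = [(routes.foldl (pvStA (park.map String.toList))
            ((pvFindA (park.map String.toList) 0).getD (0, 0))).1,
         (routes.foldl (pvStA (park.map String.toList))
            ((pvFindA (park.map String.toList) 0).getD (0, 0))).2] := rfl
  have e2 : solution_alt park routes
      = [(routes.foldl (pvStB (park.map (fun s => PySem.List.slice s.toList none
            (some (PySem.Str.len (PySem.List.pyGetD park 0 ""))))))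
            ((pvStartB (park.map (fun s => PySem.List.slice s.toList none
            (some (PySem.Str.len (PySem.List.pyGetD park 0 "")))))).getD (0, 0))).1,
         (routes.foldl (pvStB (park.map (fun s => PySem.List.slice s.toList none
            (some (PySem.Str.len (PySem.List.pyGetD park 0 ""))))))
            ((pvStartB (park.map (fun s => PySem.List.slice s.toList none
            (some (PySem.Str.len (PySem.List.pyGetD park 0 "")))))).getD (0, 0))).2] := rfl
  rcases hrag with rfl | hge
  · -- no routes: both results are the start cell
    rw [e1, e2, hgridB, pvStartB_eq]
    simp only [List.foldl_nil]
    rw [hstartG, hstartC]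
  · -- routes present: all rows reach len(park[0]); run the fold invariant
    have hrow : ∀ r ∈ (park.map String.toList).map (List.take q0.toList.length),
        r.length = (PySem.List.pyGetD
          ((park.map String.toList).map (List.take q0.toList.length)) 0 []).length := by
      rw [hfirstC]
      intro r hr
      obtain ⟨r', hr', rfl⟩ := List.mem_map.1 hr
      obtain ⟨s, hs, rfl⟩ := List.mem_map.1 hr'
      have h1 := hge s hs
      rw [hq] at h1
      simp only [List.headD_cons] at h1
      rw [List.length_take]
      omega
    obtain ⟨x', y', hA, hB⟩ :=
      pvFold_both (park.map String.toList)
        ((park.map String.toList).map (List.take q0.toList.length)) hne hrow hOk routes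
        (fun rt h => hroutes rt h) pre.length j hi hjcC
    rw [e1, e2, hgridB, pvStartB_eq, hstartG, hstartC]
    simp only [Option.getD_some]
    rw [hA, hB]
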